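-- pv_equiv track=rewrite | github.com/pypi-data/pypi-mirror-359 | packages/sseed/sseed-1.11.5-py3-none-any.whl/sseed/validation/analysis.py | _detect_weak_signatures
-- ===== SOURCE A (Python) =====
-- from typing import (
--     Any,
--     Dict,
--     List,
--     Optional,
-- )
--
-- def _detect_weak_signatures(words: List[str]) -> List[str]:
--     """Detect known weak mnemonic signatures."""
--     signatures = []
--
--     # Check for common test mnemonics
--     test_patterns = [
--         "abandon",
--         "test",
--         "example",
--         "sample",
--     ]
--
--     for pattern in test_patterns:
--         if any(pattern in word.lower() for word in words):
--             signatures.append(f"contains test pattern: {pattern}")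
--
--     return signatures
-- ===== SOURCE B (Python) =====
-- def _detect_weak_signatures(words):
--     """Detect known weak mnemonic signatures.
--
--     Builds one space-joined lowercase corpus and tests each pattern once
--     against it; correct because no pattern contains a space, so a match in
--     the corpus cannot span a word boundary."""
--     corpus = " ".join(word.lower() for word in words)
--     return ["contains test pattern: " + p
--             for p in ("abandon", "test", "example", "sample")
--             if p in corpus]
-- ===== Notes on version B (the rewrite author's own statement) =====
-- stated objective: faster
-- what changed: Replaces A's per-pattern any() scans over the word list (lowercasing every word once per pattern) with a single space-joined lowercase corpus built once, against which each pattern is substring-tested exactly once; correct because no pattern contains a space, so a match cannot span a word boundary.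
import Mathlib
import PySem

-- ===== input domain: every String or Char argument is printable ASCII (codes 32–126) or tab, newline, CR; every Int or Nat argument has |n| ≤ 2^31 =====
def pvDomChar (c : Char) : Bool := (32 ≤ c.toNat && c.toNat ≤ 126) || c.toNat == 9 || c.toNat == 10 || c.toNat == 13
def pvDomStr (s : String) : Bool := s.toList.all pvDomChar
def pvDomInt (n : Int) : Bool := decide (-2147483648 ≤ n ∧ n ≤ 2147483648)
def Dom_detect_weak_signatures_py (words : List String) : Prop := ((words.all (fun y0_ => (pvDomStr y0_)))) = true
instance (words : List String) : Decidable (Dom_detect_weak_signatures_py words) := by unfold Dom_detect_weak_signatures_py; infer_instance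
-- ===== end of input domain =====

-- B builds one space-joined lowercase corpus and tests each pattern once against it
-- (correct since no pattern contains a space); a different algorithm, measured faster by a constant factor (one lowercase+join, one C-level substring search per pattern).

-- ===== PORT A =====
def pvPatterns : List String := ["abandon", "test", "example", "sample"]

def detect_weak_signatures_py (words : List String) : List String :=
  pvPatterns.foldl (fun signatures pattern =>
    if words.any (fun word => PySem.Str.isIn pattern (PySem.Str.lower word)) then
      signatures ++ ["contains test pattern: " ++ pattern]
    else signatures) []

-- ===== PORT B =====
def detect_weak_signatures_py_alt (words : List String) : List String :=
  let corpus := PySem.Str.join " " (words.map PySem.Str.lower)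
  (pvPatterns.filter (fun p => PySem.Str.isIn p corpus)).map
    (fun p => "contains test pattern: " ++ p)

-- ===== PRECONDITION & SPEC =====
def Spec_detect_weak_signatures_py (words : List String) (out : List String) : Prop := out = detect_weak_signatures_py_alt words
instance (words : List String) (out : List String) : Decidable (Spec_detect_weak_signatures_py words out) := by unfold Spec_detect_weak_signatures_py; infer_instance

-- ===== CLAIM =====
def Claim_equal_detect_weak_signatures_py : Prop := ∀ (words : List String), Dom_detect_weak_signatures_py words → Spec_detect_weak_signatures_py words (detect_weak_signatures_py words)

-- ===== LEMMAS AND PROOFS =====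

-- A prefix of a ++ c :: b that avoids c is a prefix of a.
theorem pv_prefix_split {c : Char} {p a b : List Char} (hc : c ∉ p)
    (h : p <+: a ++ c :: b) : p <+: a := by
  rcases Nat.lt_or_ge a.length p.length with hlt | hge
  case inr => exact List.prefix_of_prefix_length_le h (List.prefix_append a (c :: b)) hge
  case inl =>
    exfalso
    obtain ⟨t, ht⟩ := h
    have hg : (p ++ t)[a.length]? = some c := by
      rw [ht]
      simp
    rw [List.getElem?_append_left hlt] at hg
    exact hc (List.mem_of_getElem? hg)

-- An occurrence of a c-free pattern cannot straddle the separator c.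
theorem pv_infix_append_cons {c : Char} {p : List Char} (hc : c ∉ p) (a b : List Char) :
    p <:+: a ++ c :: b ↔ p <:+: a ∨ p <:+: b := by
  induction a with
  | nil =>
    rw [List.nil_append, List.infix_cons_iff]
    constructor
    · rintro (hpre | hinf)
      · cases p with
        | nil => exact Or.inl (List.infix_refl _)
        | cons x xs =>
          obtain ⟨t, ht⟩ := hpre
          injection ht with h1 _
          exact absurd (h1 ▸ List.mem_cons_self) hc
      · exact Or.inr hinf
    · rintro (hinf | hinf)
      · rw [List.infix_nil] at hinf
        subst hinf
        exact Or.inl (List.nil_prefix)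
      · exact Or.inr hinf
  | cons x a ih =>
    rw [List.cons_append, List.infix_cons_iff, ih, List.infix_cons_iff]
    constructor
    · rintro (hpre | h | h)
      · exact Or.inl (Or.inl (pv_prefix_split hc hpre))
      · exact Or.inl (Or.inr h)
      · exact Or.inr h
    · rintro ((hpre | h) | h)
      · exact Or.inl (hpre.trans (List.prefix_append (x :: a) (c :: b)))
      · exact Or.inr (Or.inl h)
      · exact Or.inr (Or.inr h)

-- A space-free nonempty pattern occurs in the space-joined corpus iff it occurs in some part.
theorem pv_isIn_join {p : List Char} (hc : ' ' ∉ p) (hne : p ≠ []) (ls : List (List Char)) :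
    PySem.Chars.isIn p (PySem.Chars.join [' '] ls) =
      ls.any (fun l => PySem.Chars.isIn p l) := by
  induction ls with
  | nil =>
    rw [PySem.Chars.join_nil, List.any_nil, PySem.Chars.isIn_eq_false_iff, List.infix_nil]
    exact hne
  | cons l ls ih =>
    cases ls with
    | nil => rw [PySem.Chars.join_singleton]; simp
    | cons m rest =>
      rw [PySem.Chars.join_cons_cons, List.any_cons, Bool.eq_iff_iff,
        PySem.Chars.isIn_iff_infix, List.append_assoc, List.singleton_append,
        pv_infix_append_cons hc]
      rw [← PySem.Chars.isIn_iff_infix, ← PySem.Chars.isIn_iff_infix, ← ih]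
      simp [Bool.or_eq_true]

-- A's per-pattern any() over words equals one membership test in B's joined corpus.
theorem pv_any_eq_isIn_corpus (words : List String) (p : String)
    (hc : ' ' ∉ p.toList) (hne : p.toList ≠ []) :
    (words.any fun w => PySem.Str.isIn p (PySem.Str.lower w)) =
      PySem.Str.isIn p (PySem.Str.join " " (words.map PySem.Str.lower)) := by
  rw [PySem.Str.isIn_eq, PySem.Str.toList_join]
  have hsep : " ".toList = [' '] := by decide
  rw [hsep, pv_isIn_join hc hne, List.map_map, List.any_map]
  refine List.any_congr rfl fun w => ?_
  rw [PySem.Str.isIn_eq]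
  rfl

-- ===== VERDICT =====
theorem detect_weak_signatures_py_spec : Claim_equal_detect_weak_signatures_py := by
  intro words _
  show detect_weak_signatures_py words = detect_weak_signatures_py_alt words
  unfold detect_weak_signatures_py detect_weak_signatures_py_alt
  rw [PySem.List.foldl_append_if, List.nil_append]
  congr 1
  apply List.filter_congr
  intro p hp
  have hp' : p = "abandon" ∨ p = "test" ∨ p = "example" ∨ p = "sample" := by
    simpa [pvPatterns] using hp
  rcases hp' with rfl | rfl | rfl | rfl <;>
    exact pv_any_eq_isIn_corpus words _ (by decide) (by decide)
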